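-- pv_equiv track=rewrite | github.com/shinonome-inc/tokyo-flutter-hackathon-2024-team-PlayGround | backend/lambda/feed.py | update_character_level
-- ===== SOURCE A (Python) =====
-- def update_character_level(user):
--     # 必要経験値: 2^n * 10（nは現在のレベル）
--     total_xp = user.get('characterExperience', 0)
--     level = 1
--     cumulative_xp = 0
--
--     while True:
--         required_xp = 10 * (2 ** level)
--         cumulative_xp += required_xp
--
--         if total_xp >= cumulative_xp:
--             level += 1
--         else:
--             break
--
--     user['characterLevel'] = level
--     return level
-- ===== SOURCE B (Python) =====
-- def update_character_level(user):
--     # Closed form: the loop leaves level = largest L>=1 with total_xp >= 10*(2^L - 2),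
--     # i.e. 2^L <= total_xp//10 + 2; computed via bit_length instead of looping.
--     q = user.get('characterExperience', 0) // 10 + 2
--     level = q.bit_length() - 1 if q >= 2 else 1
--     user['characterLevel'] = level
--     return level
-- ===== Notes on version B (the rewrite author's own statement) =====
-- stated objective: simpler
-- what changed: Replaces the level-by-level while-loop over doubling XP thresholds with a closed-form bit_length computation (level = largest L with 2^L <= total_xp//10 + 2, else 1).
import Mathlib
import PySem

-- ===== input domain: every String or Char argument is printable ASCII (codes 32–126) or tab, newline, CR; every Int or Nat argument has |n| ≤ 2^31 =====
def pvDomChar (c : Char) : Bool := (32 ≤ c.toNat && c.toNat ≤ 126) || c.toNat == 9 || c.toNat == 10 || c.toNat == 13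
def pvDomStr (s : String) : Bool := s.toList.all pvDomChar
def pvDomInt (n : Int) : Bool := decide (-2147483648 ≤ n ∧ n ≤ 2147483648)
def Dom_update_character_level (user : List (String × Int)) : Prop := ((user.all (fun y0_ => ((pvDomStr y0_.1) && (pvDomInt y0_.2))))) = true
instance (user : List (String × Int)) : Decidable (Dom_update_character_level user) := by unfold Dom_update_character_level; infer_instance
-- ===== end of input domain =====

-- B replaces A's threshold loop by a closed-form bit_length computation.
-- NOTE: the Python A (and B) also write user['characterLevel']; the equivalence proved
-- here is about the RETURN value only.

-- ===== PORT A =====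
-- the 'while True' loop of A: cumulative_xp grows by 10*2^level each turn, so
-- total_xp - cumulative_xp strictly decreases while the loop continues.
def pvLoopA (total cum : Int) (level : Nat) : Int :=
  let required := 10 * (2 : Int) ^ level
  let cum' := cum + required
  if total ≥ cum' then pvLoopA total cum' (level + 1) else (level : Int)
termination_by (total - cum).toNat
decreasing_by
  have h2 : (1 : Int) ≤ (2 : Int) ^ level := one_le_pow₀ (by norm_num)
  simp only [ge_iff_le] at *
  omega

def update_character_level (user : List (String × Int)) : Int :=
  let total_xp := PySem.Dict.getD (PySem.Dict.ofList user) "characterExperience" 0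
  pvLoopA total_xp 0 1

-- ===== PORT B =====
def update_character_level_alt (user : List (String × Int)) : Int :=
  let q := PySem.Int.floordiv (PySem.Dict.getD (PySem.Dict.ofList user) "characterExperience" 0) 10 + 2
  -- q.bit_length() for the nonnegative q on this branch is PySem.Int.bitLength q
  if q ≥ 2 then (PySem.Int.bitLength q : Int) - 1 else 1

-- ===== PRECONDITION & SPEC =====
def Spec_update_character_level (user : List (String × Int)) (out : Int) : Prop := out = update_character_level_alt user
instance (user : List (String × Int)) (out : Int) : Decidable (Spec_update_character_level user out) := by unfold Spec_update_character_level; infer_instance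

-- ===== CLAIM (what is proved, stated in full; the proofs are below) =====
def Claim_equal_update_character_level : Prop := ∀ (user : List (String × Int)), Dom_update_character_level user → Spec_update_character_level user (update_character_level user)

-- ===== LEMMAS AND PROOFS =====

-- A's loop stops immediately when total < cum + 10*2^level.
theorem pvLoopA_base (total cum : Int) (level : Nat)
    (h : total < cum + 10 * (2 : Int) ^ level) :
    pvLoopA total cum level = (level : Int) := by
  rw [pvLoopA]
  simp only [ge_iff_le]
  rw [if_neg (by omega)]

-- A's loop run from (cum, level) for k further incrementing steps.
theorem pvLoopA_spec (k : Nat) : ∀ (level : Nat) (cum total : Int),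
    cum + 10 * ((2 : Int) ^ (level + k) - 2 ^ level) ≤ total →
    total < cum + 10 * ((2 : Int) ^ (level + k + 1) - 2 ^ level) →
    pvLoopA total cum level = ((level + k : Nat) : Int) := by
  induction k with
  | zero =>
    intro level cum total _ hhi
    simp only [Nat.add_zero] at *
    exact pvLoopA_base total cum level (by rw [pow_succ] at hhi; ring_nf at hhi ⊢; omega)
  | succ k ih =>
    intro level cum total hlo hhi
    have e1 : (2 : Int) ^ (level + 1 + k) = 2 ^ (level + (k + 1)) := by congr 1; omega
    have e2 : (2 : Int) ^ (level + 1 + k + 1) = 2 ^ (level + (k + 1) + 1) := by congr 1; omega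
    have e3 : (2 : Int) ^ (level + 1) = 2 * 2 ^ level := by rw [pow_succ]; ring
    have e4 : (2 : Int) ^ (level + (k + 1) + 1) = 2 * 2 ^ (level + (k + 1)) := by
      rw [pow_succ]; ring
    have hmono : (2 : Int) ^ (level + 1) ≤ 2 ^ (level + (k + 1)) :=
      pow_le_pow_right₀ (by norm_num) (by omega)
    have hstep : cum + 10 * 2 ^ level ≤ total := by rw [e3] at hmono; omega
    rw [pvLoopA]
    simp only [ge_iff_le]
    rw [if_pos (by omega)]
    rw [ih (level + 1) (cum + 10 * (2 : Int) ^ level) total (by rw [e1, e3]; omega)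
        (by rw [e2, e3]; omega)]
    push_cast
    ring

-- bit_length brackets: 2^(bitLength q - 1) ≤ q < 2^(bitLength q) for q ≥ 1.
theorem pv_bitLength_brackets (q : Int) (hq : 1 ≤ q) :
    (2 : Int) ^ (PySem.Int.bitLength q - 1) ≤ q ∧ q < (2 : Int) ^ (PySem.Int.bitLength q) := by
  have h1 := PySem.Int.lt_two_pow_bitLength q
  have h2 := PySem.Int.two_pow_bitLength_le q (by omega)
  have habs : (q.natAbs : Int) = q := Int.natAbs_of_nonneg (by omega)
  constructor
  · calc (2 : Int) ^ (PySem.Int.bitLength q - 1) = ((2 ^ (PySem.Int.bitLength q - 1) : Nat) : Int) := by push_cast; ring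
      _ ≤ (q.natAbs : Int) := by exact_mod_cast h2
      _ = q := habs
  · calc q = (q.natAbs : Int) := habs.symm
      _ < ((2 ^ PySem.Int.bitLength q : Nat) : Int) := by exact_mod_cast h1
      _ = (2 : Int) ^ PySem.Int.bitLength q := by push_cast; ring

-- core arithmetic equivalence, for any total experience value
theorem pv_core (total : Int) :
    pvLoopA total 0 1 =
      (if PySem.Int.floordiv total 10 + 2 ≥ 2 then (PySem.Int.bitLength (PySem.Int.floordiv total 10 + 2) : Int) - 1 else 1) := by
  rw [PySem.Int.floordiv_eq_ediv_of_pos (by norm_num)]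
  set d : Int := total / 10 with hd
  have hdm : 10 * d ≤ total ∧ total < 10 * d + 10 := by omega
  by_cases h : d + 2 ≥ 2
  · rw [if_pos h]
    obtain ⟨hlo, hhi⟩ := pv_bitLength_brackets (d + 2) (by omega)
    set L : Nat := PySem.Int.bitLength (d + 2) with hL
    have hL2 : 2 ≤ L := by
      by_contra hc
      have h1 : (2 : Int) ^ L ≤ 2 ^ 1 := pow_le_pow_right₀ (by norm_num) (by omega)
      norm_num at h1; omega
    have e1 : (2 : Int) ^ (1 + (L - 2)) = 2 ^ (L - 1) := by congr 1; omega
    have e2 : (2 : Int) ^ (1 + (L - 2) + 1) = 2 ^ L := by congr 1; omega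
    have e3 : (2 : Int) ^ L = 2 * 2 ^ (L - 1) := by
      conv_lhs => rw [show L = (L - 1) + 1 by omega]
      rw [pow_succ]; ring
    rw [pvLoopA_spec (L - 2) 1 0 total (by rw [e1]; norm_num; omega)
        (by rw [e2]; norm_num; omega)]
    push_cast
    omega
  · rw [if_neg h]
    rw [pvLoopA_base total 0 1 (by norm_num; omega)]
    norm_num

-- ===== VERDICT (by name: the statement is the Claim_ definition above) =====
theorem update_character_level_spec : Claim_equal_update_character_level := by
  intro user _
  unfold Spec_update_character_level update_character_level update_character_level_alt
  exact pv_core (PySem.Dict.getD (PySem.Dict.ofList user) "characterExperience" 0)
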